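-- pv_equiv track=rewrite | github.com/stevemccoy/aoc2024 | py/day14/day14.py | simulate_bots
-- ===== SOURCE A (Python) =====
-- def simulate_bots(bots, num_x, num_y, num_steps):
-- 	after = []
-- 	for (p,v) in bots:
-- 		(x,y) = p
-- 		(vx,vy) = v
-- 		for i in range(num_steps):
-- 			x = (x + vx) % num_x
-- 			y = (y + vy) % num_y
-- 		after.append(((x,y),(vx,vy)))
-- 	return after
-- ===== SOURCE B (Python) =====
-- def simulate_bots(bots, num_x, num_y, num_steps):
-- 	return [(((x + vx * num_steps) % num_x, (y + vy * num_steps) % num_y), (vx, vy))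
-- 			for ((x, y), (vx, vy)) in bots]
-- ===== Notes on version B (the rewrite author's own statement) =====
-- stated objective: faster
-- what changed: Replaces the per-bot step-by-step simulation loop with the closed form (x + vx*num_steps) % num_x per coordinate in one pass; Pre_ restricts to the simulation's natural domain (positive step count, nonzero grid dimensions when bots are present): for num_steps <= 0 A skips the loop and returns positions unnormalized while B normalizes mod the grid (or raises when a dimension is 0), and for a zero dimension with positive steps A itself raises ZeroDivisionError.
-- outside the precondition, e.g. on simulate_bots([((5, 6), (2, 3))], 4, 4, 0): A returns [((5, 6), (2, 3))], B returns [((1, 2), (2, 3))]; on simulate_bots([((5, 6), (2, 3))], 0, 4, -1): A returns [((5, 6), (2, 3))], B raises ZeroDivisionError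
import Mathlib
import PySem

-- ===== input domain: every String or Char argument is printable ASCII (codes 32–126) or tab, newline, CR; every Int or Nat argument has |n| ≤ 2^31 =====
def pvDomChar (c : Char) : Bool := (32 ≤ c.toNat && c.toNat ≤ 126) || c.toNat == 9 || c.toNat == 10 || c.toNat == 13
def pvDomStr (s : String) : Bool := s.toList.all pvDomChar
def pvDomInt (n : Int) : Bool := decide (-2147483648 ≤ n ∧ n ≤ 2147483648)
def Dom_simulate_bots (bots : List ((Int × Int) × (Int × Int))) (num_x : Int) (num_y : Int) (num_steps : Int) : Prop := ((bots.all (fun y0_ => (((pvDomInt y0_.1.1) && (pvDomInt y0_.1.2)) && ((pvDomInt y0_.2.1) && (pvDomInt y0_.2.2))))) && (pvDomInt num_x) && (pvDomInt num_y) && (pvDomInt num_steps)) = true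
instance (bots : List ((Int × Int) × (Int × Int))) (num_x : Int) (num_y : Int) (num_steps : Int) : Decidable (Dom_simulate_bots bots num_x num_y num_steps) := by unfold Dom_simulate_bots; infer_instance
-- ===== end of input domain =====

-- B replaces the per-step wraparound loop with the closed form (x + vx*num_steps) % num_x per coordinate (objective: faster).
-- ===== PORT A =====
def simulate_bots (bots : List ((Int × Int) × (Int × Int))) (num_x : Int) (num_y : Int) (num_steps : Int) : List ((Int × Int) × (Int × Int)) :=
  bots.foldl (fun after pv =>
    let x0 := pv.1.1
    let y0 := pv.1.2
    let vx := pv.2.1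
    let vy := pv.2.2
    let xy := (PySem.List.pyRange 0 num_steps 1).foldl
      (fun (s : Int × Int) _ => (PySem.Int.mod (s.1 + vx) num_x, PySem.Int.mod (s.2 + vy) num_y))
      (x0, y0)
    after ++ [((xy.1, xy.2), (vx, vy))]) []

-- ===== PORT B =====
def simulate_bots_alt (bots : List ((Int × Int) × (Int × Int))) (num_x : Int) (num_y : Int) (num_steps : Int) : List ((Int × Int) × (Int × Int)) :=
  bots.map (fun b =>
    ((PySem.Int.mod (b.1.1 + b.2.1 * num_steps) num_x,
      PySem.Int.mod (b.1.2 + b.2.2 * num_steps) num_y),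
     (b.2.1, b.2.2)))

-- ===== PRECONDITION & SPEC =====
-- Pre_ restricts to the simulation's natural domain — a positive step count and (when bots are present)
-- nonzero grid dimensions. Excluded inputs on which A still returns: num_steps ≤ 0, where A skips the loop
-- and returns positions unnormalized (outside the simulation's domain; B normalizes mod the grid, and
-- raises ZeroDivisionError when a dimension is 0). For a zero dimension with positive steps and bots
-- present, A itself raises ZeroDivisionError.
def Pre_simulate_bots (bots : List ((Int × Int) × (Int × Int))) (num_x : Int) (num_y : Int) (num_steps : Int) : Prop :=
  0 < num_steps ∧ (bots = [] ∨ (num_x ≠ 0 ∧ num_y ≠ 0))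
instance (bots : List ((Int × Int) × (Int × Int))) (num_x : Int) (num_y : Int) (num_steps : Int) : Decidable (Pre_simulate_bots bots num_x num_y num_steps) := by unfold Pre_simulate_bots; infer_instance
def pvWitness_simulate_bots : (List ((Int × Int) × (Int × Int))) × Int × Int × Int := ([((2, 3), (-1, 4))], 5, 7, 3)

def Spec_simulate_bots (bots : List ((Int × Int) × (Int × Int))) (num_x : Int) (num_y : Int) (num_steps : Int) (out : List ((Int × Int) × (Int × Int))) : Prop := out = simulate_bots_alt bots num_x num_y num_steps
instance (bots : List ((Int × Int) × (Int × Int))) (num_x : Int) (num_y : Int) (num_steps : Int) (out : List ((Int × Int) × (Int × Int))) : Decidable (Spec_simulate_bots bots num_x num_y num_steps out) := by unfold Spec_simulate_bots; infer_instance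

-- ===== CLAIM (what is proved, stated in full; the proofs are below) =====
def Claim_equal_simulate_bots : Prop := ∀ (bots : List ((Int × Int) × (Int × Int))) (num_x : Int) (num_y : Int) (num_steps : Int), Dom_simulate_bots bots num_x num_y num_steps → Pre_simulate_bots bots num_x num_y num_steps → Spec_simulate_bots bots num_x num_y num_steps (simulate_bots bots num_x num_y num_steps)

-- ===== LEMMAS AND PROOFS =====

-- Python %: re-modding before adding does not change the residue (holds for every modulus m, incl. m = 0).
theorem pymod_add_absorb (a v m : Int) :
    PySem.Int.mod (PySem.Int.mod a m + v) m = PySem.Int.mod (a + v) m := by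
  show Int.fmod (Int.fmod a m + v) m = Int.fmod (a + v) m
  have h : Int.fmod a m + v = (a + v) + m * (-(Int.fdiv a m)) := by
    have := Int.fmod_add_mul_fdiv a m
    linarith
  rw [h, Int.add_mul_fmod_self_left]

-- A's inner loop, run n > 0 times, computes the closed form of B.
theorem iter_closed (vx vy nx ny : Int) (n : Nat) (hn : 0 < n) (x y : Int) :
    (List.range n).foldl
      (fun (s : Int × Int) _ => (PySem.Int.mod (s.1 + vx) nx, PySem.Int.mod (s.2 + vy) ny)) (x, y)
    = (PySem.Int.mod (x + vx * n) nx, PySem.Int.mod (y + vy * n) ny) := by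
  induction n with
  | zero => omega
  | succ k ih =>
    rcases Nat.eq_zero_or_pos k with hk | hk
    · subst hk
      simp [List.range_succ]
    · rw [List.range_succ, List.foldl_append, ih hk]
      simp only [List.foldl_cons, List.foldl_nil]
      rw [pymod_add_absorb, pymod_add_absorb]
      push_cast
      rw [show x + vx * (k : Int) + vx = x + vx * ((k : Int) + 1) from by ring,
          show y + vy * (k : Int) + vy = y + vy * ((k : Int) + 1) from by ring]

-- ===== VERDICT (by name: the statement is the Claim_ definition above) =====
theorem simulate_bots_spec : Claim_equal_simulate_bots := by
  intro bots num_x num_y num_steps _ hpre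
  have hs : 0 < num_steps := hpre.1
  unfold Spec_simulate_bots simulate_bots simulate_bots_alt
  rw [PySem.List.foldl_append_singleton_eq_map]
  simp only [List.nil_append]
  apply List.map_congr_left
  intro b _
  rw [PySem.List.pyRange_one 0 num_steps, List.foldl_map]
  rw [iter_closed _ _ _ _ _ (by omega : 0 < (num_steps - 0).toNat)]
  have hcast : ((num_steps - 0).toNat : Int) = num_steps := by omega
  rw [hcast]
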